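-- pv_equiv track=rewrite | github.com/eugene-eeo/simpid | simpid.py | target_partition
-- ===== SOURCE A (Python) =====
-- def target_partition(max_time, targets):
--     n = len(targets)
--     step = max_time // n
--     start, end = 0, step
--     for i, t in enumerate(targets):
--         if i == n - 1:
--             end += max_time - n * step
--         yield t, (start, end)
--         start = end
--         end += step
-- ===== SOURCE B (Python) =====
-- def target_partition(max_time, targets):
--     n = len(targets)
--     step = max_time // n
--     cuts = [i * step for i in range(n)] + [max_time]
--     for t, se in zip(targets, zip(cuts, cuts[1:])):
--         yield t, se
-- ===== Notes on version B (the rewrite author's own statement) =====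
-- stated objective: alternative
-- what changed: Replaces the accumulator-threaded start/end loop with two stages: build the list of cut points [0, step, ..., (n-1)*step, max_time] once, then zip targets with consecutive cut pairs, eliminating both the running state and the per-element last-index branch.
-- outside the precondition, e.g. on target_partition(10, []): A raises ZeroDivisionError, B raises ZeroDivisionError
import Mathlib
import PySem

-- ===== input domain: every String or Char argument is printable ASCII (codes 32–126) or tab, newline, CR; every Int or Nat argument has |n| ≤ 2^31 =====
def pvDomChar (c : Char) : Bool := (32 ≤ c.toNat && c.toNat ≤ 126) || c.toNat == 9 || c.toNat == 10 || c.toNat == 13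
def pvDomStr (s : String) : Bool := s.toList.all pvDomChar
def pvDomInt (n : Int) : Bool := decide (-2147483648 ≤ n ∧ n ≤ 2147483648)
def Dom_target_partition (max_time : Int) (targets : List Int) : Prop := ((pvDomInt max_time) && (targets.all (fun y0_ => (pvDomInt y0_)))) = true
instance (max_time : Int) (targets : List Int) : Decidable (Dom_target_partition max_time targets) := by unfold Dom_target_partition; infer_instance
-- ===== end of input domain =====

-- B builds the cut-point list [0, step, ..., (n-1)*step, max_time] once and zips targets with
-- consecutive cut pairs, instead of A's accumulator-threaded loop; equivalence is about the list of yielded values.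

-- ===== PORT A =====
-- the 'for i, t in enumerate(targets)' loop of A, threading (i, start, end)
def pvLoopA (max_time n step : Int) : List Int → Int → Int → Int → List (Int × (Int × Int))
  | [], _, _, _ => []
  | t :: rest, i, start, e =>
    let e' := if i = n - 1 then e + (max_time - n * step) else e
    (t, (start, e')) :: pvLoopA max_time n step rest (i + 1) e' (e' + step)

def target_partition (max_time : Int) (targets : List Int) : List (Int × (Int × Int)) :=
  let n : Int := targets.length
  let step := PySem.Int.floordiv max_time n
  pvLoopA max_time n step targets 0 0 step

-- ===== PORT B =====
def target_partition_alt (max_time : Int) (targets : List Int) : List (Int × (Int × Int)) :=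
  let n : Int := targets.length
  let step := PySem.Int.floordiv max_time n
  let cuts := (PySem.List.pyRange 0 n 1).map (fun i => i * step) ++ [max_time]
  List.zipWith (fun t se => (t, se)) targets (cuts.zip cuts.tail)

-- ===== PRECONDITION & SPEC =====
-- Pre_ excludes empty targets, on which both A and B raise ZeroDivisionError from max_time // 0.
def Pre_target_partition (max_time : Int) (targets : List Int) : Prop := targets ≠ []
instance (max_time : Int) (targets : List Int) : Decidable (Pre_target_partition max_time targets) := by unfold Pre_target_partition; infer_instance
def pvWitness_target_partition : Int × List Int := (10, [1, 2, 3])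

def Spec_target_partition (max_time : Int) (targets : List Int) (out : List (Int × (Int × Int))) : Prop := out = target_partition_alt max_time targets
instance (max_time : Int) (targets : List Int) (out : List (Int × (Int × Int))) : Decidable (Spec_target_partition max_time targets out) := by unfold Spec_target_partition; infer_instance

-- ===== CLAIM (what is proved, stated in full; the proofs are below) =====
def Claim_equal_target_partition : Prop := ∀ (max_time : Int) (targets : List Int), Dom_target_partition max_time targets → Pre_target_partition max_time targets → Spec_target_partition max_time targets (target_partition max_time targets)

-- ===== LEMMAS AND PROOFS =====

-- proof-side closed form: element at index i is (t, (i*step, (i+1)*step or max_time))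
def pvSpec (max_time n step : Int) : List Int → Int → List (Int × (Int × Int))
  | [], _ => []
  | t :: rest, i =>
    (t, (i * step, if i = n - 1 then max_time else (i + 1) * step)) :: pvSpec max_time n step rest (i + 1)

-- A's loop, entered at index i with start = i*step and end = (i+1)*step, yields the closed form
theorem pvLoopA_eq_spec (max_time n step : Int) (l : List Int) (i : Int)
    (h : i + l.length = n) :
    pvLoopA max_time n step l i (i * step) (i * step + step)
      = pvSpec max_time n step l i := by
  induction l generalizing i with
  | nil => rfl
  | cons t rest ih =>
    simp only [pvLoopA, pvSpec]
    by_cases hl : i = n - 1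
    · have hrest : rest = [] := by
        cases rest with
        | nil => rfl
        | cons a b => exfalso; simp only [List.length_cons] at h; omega
      subst hrest
      simp only [if_pos hl, pvLoopA, pvSpec, List.cons.injEq, Prod.mk.injEq]
      simp only [List.length_cons, List.length_nil] at h
      refine ⟨⟨trivial, trivial, ?_⟩, trivial⟩
      have hn : n = i + 1 := by omega
      subst hn; ring
    · simp only [if_neg hl, List.cons.injEq, Prod.mk.injEq]
      have h2 : (i + 1) + rest.length = n := by
        simp only [List.length_cons] at h; omega
      have hrec := ih (i + 1) h2
      have e1 : (i + 1) * step = i * step + step := by ring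
      rw [e1] at hrec
      exact ⟨⟨trivial, trivial, by ring⟩, hrec⟩

-- B's zip over the cut suffix starting at index i yields the same closed form
theorem pvZip_eq_spec (max_time n step : Int) (l : List Int) (i : Int)
    (h : i + l.length = n) :
    List.zipWith (fun t se => (t, se)) l
      ((((PySem.List.pyRange i n 1).map (fun j => j * step) ++ [max_time]).zip
        (((PySem.List.pyRange i n 1).map (fun j => j * step) ++ [max_time]).tail))
      : List (Int × Int))
      = pvSpec max_time n step l i := by
  induction l generalizing i with
  | nil => rfl
  | cons t rest ih =>
    have hi : i < n := by simp only [List.length_cons] at h; omega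
    rw [PySem.List.pyRange_one_cons hi]
    by_cases hl : i = n - 1
    · have hrest : rest = [] := by
        cases rest with
        | nil => rfl
        | cons a b => exfalso; simp only [List.length_cons] at h; omega
      subst hrest
      have hend : ¬ (i + 1 < n) := by omega
      have hr : PySem.List.pyRange (i + 1) n 1 = [] := by
        rw [PySem.List.pyRange_one]
        have : (n - (i + 1)).toNat = 0 := by omega
        simp [this]
      simp [hr, pvSpec, if_pos hl]
    · have hi1 : i + 1 < n := by omega
      rw [PySem.List.pyRange_one_cons hi1]
      have h2 : (i + 1) + rest.length = n := by
        simp only [List.length_cons] at h; omega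
      have hrec := ih (i + 1) h2
      rw [PySem.List.pyRange_one_cons hi1] at hrec
      simp only [List.map_cons, List.cons_append, List.tail_cons, List.zip_cons_cons,
        List.zipWith_cons_cons, pvSpec, if_neg hl] at hrec ⊢
      rw [hrec]

-- ===== VERDICT (by name: the statement is the Claim_ definition above) =====
theorem target_partition_spec : Claim_equal_target_partition := by
  intro max_time targets _ _
  unfold Spec_target_partition target_partition target_partition_alt
  have hA := pvLoopA_eq_spec max_time targets.length (PySem.Int.floordiv max_time targets.length) targets 0 (by simp)
  have hB := pvZip_eq_spec max_time targets.length (PySem.Int.floordiv max_time targets.length) targets 0 (by simp)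
  simp only [zero_mul, zero_add] at hA
  rw [hA, ← hB]
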